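-- pv_equiv track=rewrite | github.com/HuGuo-UNC-Chapel-Hill/Project-list | Parkland_College/CSC220/textarea/text1.py | pt
-- ===== SOURCE A (Python) =====
-- def pt(alist):
--     count = 0
--     word_number = 400
--     str=""
--     str+="<table>"
--     str+="<tr>"
--     for word in alist:
--         if count < 10:
--             str+= "<td>{}</td>".format(word)
--             count += 1
--             word_number -= 1
--         if count % 10 == 0:
--             str+="</tr>"
--             str+="<tr>"
--             count = 0
--         if word_number == 0:
--             break
--     str+="</tr>"
--     str+="</table>"
--     return str
-- ===== SOURCE B (Python) =====
-- def pt(alist):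
--     capped = list(alist)[:400]
--     rows = []
--     for r in range(len(capped) // 10 + 1):
--         cells = "".join("<td>{}</td>".format(w) for w in capped[10 * r:10 * r + 10])
--         rows.append("<tr>" + cells + "</tr>")
--     return "<table>" + "".join(rows) + "</table>"
-- ===== Notes on version B (the rewrite author's own statement) =====
-- stated objective: simpler
-- what changed: A's single flat loop with a mutable cell counter, a mod-10 row-break check and a 400-countdown with break is replaced by a rows-by-cells decomposition: cap the input to its first 400 words, compute the row count n//10+1 in closed form, and build each row from a slice of 10 words.
import Mathlib
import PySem

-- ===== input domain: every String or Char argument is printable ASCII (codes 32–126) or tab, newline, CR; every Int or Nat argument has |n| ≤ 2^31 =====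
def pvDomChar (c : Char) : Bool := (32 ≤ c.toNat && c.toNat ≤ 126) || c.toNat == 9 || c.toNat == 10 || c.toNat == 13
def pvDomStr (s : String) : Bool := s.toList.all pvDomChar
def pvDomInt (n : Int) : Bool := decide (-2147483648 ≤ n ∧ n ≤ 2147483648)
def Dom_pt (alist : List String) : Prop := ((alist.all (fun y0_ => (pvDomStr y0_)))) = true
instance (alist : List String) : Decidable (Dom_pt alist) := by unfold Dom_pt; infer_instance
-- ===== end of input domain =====

-- B replaces A's single flat loop (cell counter mod 10 plus a 400-countdown with break)
-- by a rows × cells decomposition: cap to the first 400 words, row count n//10+1 in closed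
-- form, each row built from a slice (objective: simpler decomposition; same cost).

-- ===== PORT A =====
-- A's loop: state (count, word_number, str); the three sequential ifs kept in order,
-- 'break' modelled by returning the accumulated string.
def ptLoop : List String → Int → Int → String → String
  | [], _, _, s => s
  | word :: rest, count, wordNumber, s =>
    let p1 := if count < 10 then (s ++ ("<td>" ++ word ++ "</td>"), count + 1, wordNumber - 1)
              else (s, count, wordNumber)
    let p2 := if PySem.Int.mod p1.2.1 10 = 0 then (p1.1 ++ "</tr>" ++ "<tr>", (0 : Int))
              else (p1.1, p1.2.1)
    if p1.2.2 = 0 then p2.1 else ptLoop rest p2.2 p1.2.2 p2.1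

def pt (alist : List String) : String :=
  ptLoop alist 0 400 ("" ++ "<table>" ++ "<tr>") ++ "</tr>" ++ "</table>"

-- ===== PORT B =====
def pt_alt (alist : List String) : String :=
  let capped := PySem.List.slice alist none (some 400)
  let rows := (PySem.List.pyRange 0 (PySem.Int.floordiv (capped.length : Int) 10 + 1) 1).map
    (fun r =>
      "<tr>" ++
        PySem.Str.join "" ((PySem.List.slice capped (some (10 * r)) (some (10 * r + 10))).map
          (fun w => "<td>" ++ w ++ "</td>")) ++
      "</tr>")
  "<table>" ++ PySem.Str.join "" rows ++ "</table>"

-- ===== PRECONDITION & SPEC =====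
def Spec_pt (alist : List String) (out : String) : Prop := out = pt_alt alist
instance (alist : List String) (out : String) : Decidable (Spec_pt alist out) := by unfold Spec_pt; infer_instance

-- ===== CLAIM (what is proved, stated in full; the proofs are below) =====
def Claim_equal_pt : Prop := ∀ (alist : List String), Dom_pt alist → Spec_pt alist (pt alist)

-- ===== LEMMAS AND PROOFS =====

-- per-word spec of A's loop from a fresh-row-relative counter c ∈ [0,10):
-- emit the cell, close-and-reopen the row after each 10th cell
def specRow : List String → Nat → String
  | [], _ => ""
  | w :: ws, c =>
    "<td>" ++ w ++ "</td>" ++ (if (c + 1) % 10 = 0 then "</tr>" ++ "<tr>" else "")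
      ++ specRow ws ((c + 1) % 10)

theorem ptLoop_eq (ws : List String) (c k : Nat) (s : String) (hc : c < 10) (hk : 0 < k) :
    ptLoop ws (c : Int) (k : Int) s = s ++ specRow (ws.take k) c := by
  induction ws generalizing c k s with
  | nil => simp [ptLoop, specRow]
  | cons w rest ih =>
    have hclt : (c : Int) < 10 := by exact_mod_cast hc
    obtain ⟨k', rfl⟩ : ∃ k', k = k' + 1 := ⟨k - 1, by omega⟩
    have heq : ((k' + 1 : Nat) : Int) - 1 = (k' : Int) := by push_cast; ring
    by_cases h9 : (c + 1) % 10 = 0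
    · have hd : (10:Int) ∣ (c:Int) + 1 := by omega
      by_cases hk1 : k' = 0
      · subst hk1
        simp [ptLoop, hclt, hd, specRow, h9, String.append_assoc]
      · have ihx := ih 0 k' (s ++ ("<td>" ++ w ++ "</td>") ++ "</tr>" ++ "<tr>") (by omega) (by omega)
        simp only [Nat.cast_zero] at ihx
        simp [String.append_assoc] at ihx
        simp [ptLoop, hclt, heq, hd, hk1, ihx, specRow, h9, String.append_assoc]
    · have hd : ¬ (10:Int) ∣ (c:Int) + 1 := by omega
      have hmod : (c + 1) % 10 = c + 1 := Nat.mod_eq_of_lt (by omega)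
      by_cases hk1 : k' = 0
      · subst hk1
        simp [ptLoop, hclt, hd, specRow, h9, String.append_assoc]
      · have ihx := ih (c + 1) k' (s ++ ("<td>" ++ w ++ "</td>")) (by omega) (by omega)
        push_cast at ihx
        simp [String.append_assoc] at ihx
        simp [ptLoop, hclt, heq, hd, hk1, ihx, specRow, hmod, String.append_assoc]

theorem join_empty_nil : PySem.Str.join "" ([] : List String) = "" := by
  simp [PySem.Str.join, PySem.Chars.join_nil]

theorem join_empty_cons (a : String) (l : List String) :
    PySem.Str.join "" (a :: l) = a ++ PySem.Str.join "" l := by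
  have h : PySem.Chars.join ([] : List Char) (a.toList :: l.map String.toList)
      = a.toList ++ PySem.Chars.join [] (l.map String.toList) := by
    cases l with
    | nil => simp [PySem.Chars.join_singleton, PySem.Chars.join_nil]
    | cons b t => simp [PySem.Chars.join_cons_cons]
  simp [PySem.Str.join, h, String.ofList_append]

-- the cells of one row
def tds (l : List String) : String :=
  PySem.Str.join "" (l.map (fun w => "<td>" ++ w ++ "</td>"))

theorem tds_nil : tds [] = "" := by simp [tds, join_empty_nil]

theorem tds_cons (w : String) (l : List String) :
    tds (w :: l) = "<td>" ++ w ++ "</td>" ++ tds l := by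
  simp [tds, join_empty_cons, String.append_assoc]

theorem specRow_chunk (ws : List String) (c : Nat) (hc : c < 10) :
    specRow ws c = tds (ws.take (10 - c)) ++
      (if 10 - c ≤ ws.length then "</tr>" ++ "<tr>" ++ specRow (ws.drop (10 - c)) 0 else "") := by
  induction ws generalizing c with
  | nil =>
    have h : ¬ (10 - c = 0) := by omega
    simp [specRow, tds_nil, h]
  | cons w ws ih =>
    by_cases h9 : c = 9
    · subst h9
      simp [specRow, tds_cons, tds_nil, ← String.append_assoc]
    · have hmod : (c + 1) % 10 = c + 1 := Nat.mod_eq_of_lt (by omega)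
      have hne : ¬ (c + 1) % 10 = 0 := by omega
      have hsub : 10 - c = (10 - (c + 1)) + 1 := by omega
      rw [specRow, if_neg hne, hmod, ih (c + 1) (by omega), hsub]
      simp only [List.take_succ_cons, List.drop_succ_cons, List.length_cons, tds_cons,
        Nat.add_le_add_iff_right]
      split_ifs with h <;> simp [← String.append_assoc]

theorem rows_eq (q : Nat) : ∀ l : List String, l.length / 10 = q →
    PySem.Str.join "" ((List.range (q + 1)).map
      (fun r => "<tr>" ++ tds ((l.drop (10 * r)).take 10) ++ "</tr>"))
    = "<tr>" ++ specRow l 0 ++ "</tr>" := by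
  induction q with
  | zero =>
    intro l hl
    have hlen : l.length < 10 := by omega
    have htake : l.take 10 = l := List.take_of_length_le (by omega)
    have hch := specRow_chunk l 0 (by omega)
    have hif : ¬ (10 - 0 ≤ l.length) := by omega
    rw [hch, if_neg hif]
    simp [join_empty_cons, join_empty_nil, htake, String.append_assoc]
  | succ q ih =>
    intro l hl
    have hlen : 10 ≤ l.length := by omega
    have hch := specRow_chunk l 0 (by omega)
    rw [List.range_succ_eq_map]
    have hmap : ∀ r : Nat,
        ((l.drop (10 * (r + 1))).take 10) = (((l.drop 10).drop (10 * r)).take 10) := by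
      intro r
      have h10 : 10 + 10 * r = 10 * (r + 1) := by ring
      rw [List.drop_drop, h10]
    have hdl : (l.drop 10).length = l.length - 10 := by simp
    have ih' := ih (l.drop 10) (by rw [hdl]; omega)
    rw [hch, if_pos (by omega)]
    simp only [List.map_cons, List.map_map, join_empty_cons, Nat.mul_zero, List.drop_zero]
    have hfun : ((fun r => "<tr>" ++ tds ((l.drop (10 * r)).take 10) ++ "</tr>") ∘ Nat.succ)
        = (fun r => "<tr>" ++ tds (((l.drop 10).drop (10 * r)).take 10) ++ "</tr>") := by
      funext r
      simp [Function.comp, hmap r]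
    rw [hfun, ih']
    simp [String.append_assoc]
    rw [← String.append_assoc]
    rfl

theorem pt_eq_alt (alist : List String) : pt alist = pt_alt alist := by
  have hA : pt alist
      = ("" ++ "<table>" ++ "<tr>") ++ specRow (alist.take 400) 0 ++ "</tr>" ++ "</table>" := by
    unfold pt
    rw [show ((0:Int)) = ((0:Nat):Int) from rfl, show ((400:Int)) = ((400:Nat):Int) from rfl,
      ptLoop_eq alist 0 400 _ (by omega) (by omega)]
  have hcap : PySem.List.slice alist none (some 400) = alist.take 400 := by
    rw [PySem.List.slice_to alist (b := 400) (by omega)]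
    congr 1
  have hfd : PySem.Int.floordiv (((alist.take 400).length : Nat) : Int) 10
      = (((alist.take 400).length / 10 : Nat) : Int) := by
    exact_mod_cast PySem.Int.floordiv_natCast (alist.take 400).length 10
  have hsl : ∀ r : Nat,
      PySem.List.slice (alist.take 400) (some (10 * (r : Int))) (some (10 * (r : Int) + 10))
        = ((alist.take 400).drop (10 * r)).take 10 := by
    intro r
    rw [PySem.List.slice_toNat]
    · congr 1 <;> omega
    all_goals omega
  have hB : pt_alt alist
      = "<table>" ++ ("<tr>" ++ specRow (alist.take 400) 0 ++ "</tr>") ++ "</table>" := by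
    simp only [pt_alt]
    rw [hcap]
    rw [hfd]
    rw [show (((((alist.take 400).length / 10 : Nat)) : Int) + 1)
        = ((((alist.take 400).length / 10 + 1 : Nat)) : Int) by push_cast; ring]
    rw [PySem.List.pyRange_zero_nat, List.map_map]
    have hfun : ((fun r : Int => "<tr>" ++ PySem.Str.join ""
          ((PySem.List.slice (alist.take 400) (some (10 * r)) (some (10 * r + 10))).map
            (fun w => "<td>" ++ w ++ "</td>")) ++ "</tr>") ∘ (fun k : Nat => (k : Int)))
        = (fun r : Nat => "<tr>" ++ tds (((alist.take 400).drop (10 * r)).take 10) ++ "</tr>") := by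
      funext r
      simp only [Function.comp, hsl r, tds]
    rw [hfun, rows_eq ((alist.take 400).length / 10) (alist.take 400) rfl]
  rw [hA, hB]
  simp [String.append_assoc]
  rw [show ("<table><tr>" : String) = "<table>" ++ "<tr>" from rfl, String.append_assoc]

-- ===== VERDICT (by name: the statement is the Claim_ definition above) =====
theorem pt_spec : Claim_equal_pt := by
  intro alist _
  exact pt_eq_alt alist
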